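-- pv_equiv track=rewrite | github.com/tiandingyi/ValueScope | python/valuescope/report_snapshot.py | _metric_id
-- ===== SOURCE A (Python) =====
-- def _metric_id(label: str) -> str:
--     normalized = []
--     for ch in label.lower().strip():
--         if ch.isalnum():
--             normalized.append(ch)
--         elif normalized and normalized[-1] != "_":
--             normalized.append("_")
--     return "".join(normalized).strip("_") or "metric"
-- ===== SOURCE B (Python) =====
-- def _metric_id(label: str) -> str:
--     s = label.lower().strip()
--     parts = []
--     i, n = 0, len(s)
--     while i < n:
--         if s[i].isalnum():
--             j = i
--             while j < n and s[j].isalnum():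
--                 j += 1
--             parts.append(s[i:j])
--             i = j
--         else:
--             i += 1
--     return "_".join(parts) or "metric"
-- ===== Notes on version B (the rewrite author's own statement) =====
-- stated objective: alternative
-- what changed: Replaces the char-by-char accumulator that emits guarded single separators and then strips them at the ends with a two-pointer run scanner that collects the maximal alphanumeric runs as substrings and joins them with the separator.
import Mathlib
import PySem

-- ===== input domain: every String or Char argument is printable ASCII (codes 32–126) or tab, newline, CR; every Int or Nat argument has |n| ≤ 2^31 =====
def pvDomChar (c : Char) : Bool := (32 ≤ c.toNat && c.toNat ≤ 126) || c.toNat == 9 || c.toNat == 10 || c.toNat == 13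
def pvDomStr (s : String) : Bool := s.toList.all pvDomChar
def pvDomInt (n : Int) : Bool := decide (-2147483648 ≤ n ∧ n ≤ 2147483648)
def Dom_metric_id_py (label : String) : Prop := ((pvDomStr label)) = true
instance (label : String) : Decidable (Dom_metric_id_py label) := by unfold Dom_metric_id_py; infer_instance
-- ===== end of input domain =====

-- B joins the maximal alphanumeric runs with the separator instead of A's guarded per-char separator emission plus final strip; same O(n) cost, different decomposition.

-- ===== PORT A =====
-- the loop body: append ch if alnum, else a single '_' when normalized is nonempty and does not already end in '_'
def pvStepA (acc : List Char) (ch : Char) : List Char :=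
  if PySem.Chars.isalnum ch then acc ++ [ch]
  else if acc ≠ [] ∧ acc.getLast? ≠ some '_' then acc ++ ['_']
  else acc

def metric_id_py (label : String) : String :=
  let normalized := (PySem.Chars.strip (PySem.Chars.lower label.toList)).foldl pvStepA []
  let r := PySem.Chars.stripChars normalized ['_']
  if r = [] then "metric" else String.ofList r

-- ===== PORT B =====
-- Source B's outer while loop: on an alnum char scan to the end of the run (inner while = takeWhile/dropWhile) and emit it; on other chars advance
def pvRuns : List Char → List (List Char)
  | [] => []
  | c :: cs =>
    if PySem.Chars.isalnum c then
      (c :: cs.takeWhile PySem.Chars.isalnum) :: pvRuns (cs.dropWhile PySem.Chars.isalnum)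
    else pvRuns cs
termination_by cs => cs.length
decreasing_by
  · exact Nat.lt_succ_of_le (List.length_dropWhile_le _ cs)
  · simp

def metric_id_py_alt (label : String) : String :=
  let parts := pvRuns (PySem.Chars.strip (PySem.Chars.lower label.toList))
  let r := PySem.Chars.join ['_'] parts
  if r = [] then "metric" else String.ofList r

-- ===== PRECONDITION & SPEC =====
def Spec_metric_id_py (label : String) (out : String) : Prop := out = metric_id_py_alt label
instance (label : String) (out : String) : Decidable (Spec_metric_id_py label out) := by unfold Spec_metric_id_py; infer_instance

-- ===== CLAIM (what is proved, stated in full; the proofs are below) =====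
def Claim_equal_metric_id_py : Prop := ∀ (label : String), Dom_metric_id_py label → Spec_metric_id_py label (metric_id_py label)

-- ===== LEMMAS AND PROOFS =====

-- abstraction of A's loop: its behaviour depends on acc only through "acc is nonempty and does not end in '_'"
def pvTailF : Bool → List Char → List Char
  | _, [] => []
  | b, c :: cs =>
    if PySem.Chars.isalnum c then c :: pvTailF true cs
    else if b then '_' :: pvTailF false cs else pvTailF false cs

def pvEndsAl (cs : List Char) : Bool :=
  match cs.getLast? with
  | some c => PySem.Chars.isalnum c
  | none => false

def pvTrail (cs : List Char) : List Char :=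
  if pvRuns cs = [] then [] else if pvEndsAl cs then [] else ['_']

theorem pvAl_ne_underscore (c : Char) (h : PySem.Chars.isalnum c = true) : c ≠ '_' := by
  intro e; subst e; exact absurd h (by decide)

theorem pvFold_eq (cs : List Char) : ∀ (acc : List Char) (b : Bool),
    (b = true ↔ (acc ≠ [] ∧ acc.getLast? ≠ some '_')) →
    List.foldl pvStepA acc cs = acc ++ pvTailF b cs := by
  induction cs with
  | nil => intro acc b _; simp [pvTailF]
  | cons c cs ih =>
    intro acc b hb
    by_cases hal : PySem.Chars.isalnum c = true
    · have step : pvStepA acc c = acc ++ [c] := by simp [pvStepA, hal]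
      have ih' := ih (acc ++ [c]) true (by
        constructor
        · intro _
          refine ⟨by simp, ?_⟩
          simp [List.getLast?_append]
          exact pvAl_ne_underscore c hal
        · intro _; rfl)
      simp only [List.foldl_cons, step, ih', pvTailF, hal]
      simp
    · have halb : PySem.Chars.isalnum c = false := by simpa using hal
      by_cases hbb : b = true
      · have hcond : acc ≠ [] ∧ acc.getLast? ≠ some '_' := hb.mp hbb
        have step : pvStepA acc c = acc ++ ['_'] := by
          simp [pvStepA, halb, hcond]
        have ih' := ih (acc ++ ['_']) false (by simp [List.getLast?_append])
        simp only [List.foldl_cons, step, ih', pvTailF, halb, hbb]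
        simp
      · have hbf : b = false := by simpa using hbb
        have hcond : ¬ (acc ≠ [] ∧ acc.getLast? ≠ some '_') := by
          intro h; exact hbb (hb.mpr h)
        have step : pvStepA acc c = acc := by
          simp [pvStepA, halb, hcond]
        have ih' := ih acc false (by
          constructor
          · intro h; exact absurd h (by simp)
          · intro h; exact absurd (hb.mpr h) hbb)
        simp only [List.foldl_cons, step, ih', pvTailF, halb, hbf]
        simp

theorem pvH1 (r rest : List Char) (h : ∀ c ∈ r, PySem.Chars.isalnum c = true) :
    pvTailF true (r ++ rest) = r ++ pvTailF true rest := by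
  induction r with
  | nil => simp
  | cons c r ih =>
    have hc := h c (by simp)
    simp only [List.cons_append, pvTailF, hc, if_pos]
    rw [ih (fun d hd => h d (by simp [hd]))]

theorem pvRuns_nil_all (cs : List Char) (h : pvRuns cs = []) :
    ∀ c ∈ cs, PySem.Chars.isalnum c = false := by
  induction cs with
  | nil => simp
  | cons c cs ih =>
    by_cases hal : PySem.Chars.isalnum c = true
    · exact absurd h (by simp [pvRuns, hal])
    · have h' : pvRuns cs = [] := by simpa [pvRuns, hal] using h
      intro d hd
      rcases List.mem_cons.mp hd with rfl | hd'
      · simpa using hal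
      · exact ih h' d hd'

theorem pvRuns_good (cs : List Char) :
    ∀ r ∈ pvRuns cs, r ≠ [] ∧ ∀ c ∈ r, PySem.Chars.isalnum c = true := by
  induction cs using pvRuns.induct with
  | case1 => simp [pvRuns]
  | case2 c cs hal ih =>
    intro r hr
    rw [pvRuns, if_pos hal] at hr
    rcases List.mem_cons.mp hr with rfl | hr'
    · refine ⟨by simp, ?_⟩
      intro d hd
      rcases List.mem_cons.mp hd with rfl | hd'
      · exact hal
      · exact List.mem_takeWhile_imp hd'
    · exact ih r hr'
  | case3 c cs hal ih =>
    intro r hr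
    rw [pvRuns, if_neg hal] at hr
    exact ih r hr

theorem pvGetLast?_cons (c : Char) (cs : List Char) (h : cs ≠ []) :
    (c :: cs).getLast? = cs.getLast? := by
  obtain ⟨d, hd⟩ := Option.isSome_iff_exists.mp (List.getLast?_isSome.mpr h)
  rw [show c :: cs = [c] ++ cs from rfl, List.getLast?_append, hd]
  simp

theorem pvDropWhile_head_junk (p : Char → Bool) (l : List Char) (e : Char) (d' : List Char)
    (h : l.dropWhile p = e :: d') : p e = false := by
  induction l with
  | nil => simp at h
  | cons x xs ih =>
    rw [List.dropWhile_cons] at h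
    by_cases hx : p x = true
    · rw [if_pos hx] at h; exact ih h
    · rw [if_neg hx] at h
      cases h
      simpa using hx

theorem pvJoin_head (R : List (List Char)) (hR : R ≠ [])
    (good : ∀ r ∈ R, r ≠ [] ∧ ∀ c ∈ r, PySem.Chars.isalnum c = true) :
    ∃ c t, PySem.Chars.join ['_'] R = c :: t ∧ PySem.Chars.isalnum c = true := by
  match R with
  | [] => exact absurd rfl hR
  | r :: R' =>
    obtain ⟨hne, hall⟩ := good r (by simp)
    obtain ⟨c, t, rfl⟩ := List.exists_cons_of_ne_nil hne
    have hc : PySem.Chars.isalnum c = true := hall c (by simp)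
    match R' with
    | [] => exact ⟨c, t, by simp [PySem.Chars.join_singleton], hc⟩
    | q :: R'' =>
      refine ⟨c, t ++ ['_'] ++ PySem.Chars.join ['_'] (q :: R''), ?_, hc⟩
      rw [PySem.Chars.join_cons_cons]
      simp

theorem pvJoin_last (R : List (List Char))
    (good : ∀ r ∈ R, r ≠ [] ∧ ∀ c ∈ r, PySem.Chars.isalnum c = true) (hR : R ≠ []) :
    ∃ c, (PySem.Chars.join ['_'] R).getLast? = some c ∧ PySem.Chars.isalnum c = true := by
  induction R with
  | nil => exact absurd rfl hR
  | cons r R' ih =>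
    obtain ⟨hne, hall⟩ := good r (by simp)
    match R' with
    | [] =>
      rw [PySem.Chars.join_singleton]
      obtain ⟨d, hd⟩ := Option.isSome_iff_exists.mp (List.getLast?_isSome.mpr hne)
      exact ⟨d, hd, hall d (List.mem_of_getLast? hd)⟩
    | q :: R'' =>
      obtain ⟨c, hc, hcal⟩ := ih (fun r hr => good r (by simp [hr])) (by simp)
      refine ⟨c, ?_, hcal⟩
      rw [PySem.Chars.join_cons_cons, List.getLast?_append, List.getLast?_append, hc]
      simp

theorem pvM (cs : List Char) :
    pvTailF false cs = PySem.Chars.join ['_'] (pvRuns cs) ++ pvTrail cs := by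
  induction cs using pvRuns.induct with
  | case1 => simp [pvTailF, pvRuns, pvTrail, PySem.Chars.join_nil]
  | case2 c cs hal ih =>
    have hsplit : cs.takeWhile PySem.Chars.isalnum ++ cs.dropWhile PySem.Chars.isalnum = cs :=
      List.takeWhile_append_dropWhile
    have htake : ∀ d ∈ cs.takeWhile PySem.Chars.isalnum, PySem.Chars.isalnum d = true :=
      fun d hd => List.mem_takeWhile_imp hd
    have lhs1 : pvTailF false (c :: cs) = c :: pvTailF true cs := by simp [pvTailF, hal]
    have lhs2 : pvTailF true cs
        = cs.takeWhile PySem.Chars.isalnum ++ pvTailF true (cs.dropWhile PySem.Chars.isalnum) := by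
      conv_lhs => rw [← hsplit]
      exact pvH1 _ _ htake
    have hrunsne : pvRuns (c :: cs) ≠ [] := by rw [pvRuns, if_pos hal]; simp
    rw [pvRuns, if_pos hal]
    match hd : cs.dropWhile PySem.Chars.isalnum with
    | [] =>
      have hcs : cs = cs.takeWhile PySem.Chars.isalnum := by
        conv_lhs => rw [← hsplit, hd, List.append_nil]
      have hruns : pvRuns [] = ([] : List (List Char)) := by simp [pvRuns]
      have hlast : pvEndsAl (c :: cs) = true := by
        obtain ⟨x, hx⟩ := Option.isSome_iff_exists.mp (List.getLast?_isSome.mpr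
          (show (c :: cs) ≠ [] by simp))
        have hxmem := List.mem_of_getLast? hx
        have hxal : PySem.Chars.isalnum x = true := by
          rcases List.mem_cons.mp hxmem with rfl | hmem
          · exact hal
          · exact htake x (by rw [← hcs]; exact hmem)
        simp [pvEndsAl, hx, hxal]
      have htr : pvTrail (c :: cs) = [] := by
        unfold pvTrail; rw [hlast, if_neg hrunsne]; simp
      rw [lhs1, lhs2, hd, hruns, PySem.Chars.join_singleton, htr]
      simp only [pvTailF, List.append_nil]
    | e :: d' =>
      have hej : PySem.Chars.isalnum e = false := pvDropWhile_head_junk _ cs e d' hd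
      have htt : pvTailF true (e :: d') = '_' :: pvTailF false d' := by simp [pvTailF, hej]
      have htf : pvTailF false d' = pvTailF false (e :: d') := by simp [pvTailF, hej]
      rw [lhs1, lhs2, hd, htt, htf, ← hd, ih, hd]
      have hcsne : (e : Char) :: d' ≠ [] := by simp
      have hlasteq : (c :: cs).getLast? = (e :: d').getLast? := by
        rw [pvGetLast?_cons c cs (by intro h; subst h; simp at hd),
          ← hsplit, hd, List.getLast?_append]
        obtain ⟨x, hx⟩ := Option.isSome_iff_exists.mp (List.getLast?_isSome.mpr hcsne)
        simp [hx]
      match hr : pvRuns (e :: d') with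
      | [] =>
        have hjunk := pvRuns_nil_all _ hr
        have hlast : pvEndsAl (c :: cs) = false := by
          obtain ⟨x, hx⟩ := Option.isSome_iff_exists.mp (List.getLast?_isSome.mpr hcsne)
          have : PySem.Chars.isalnum x = false := hjunk x (List.mem_of_getLast? hx)
          simp [pvEndsAl, hlasteq, hx, this]
        have htr : pvTrail (c :: cs) = ['_'] := by
          unfold pvTrail; rw [hlast, if_neg hrunsne]; simp
        have htr' : pvTrail (e :: d') = [] := by
          unfold pvTrail; rw [if_pos hr]
        rw [htr, htr', PySem.Chars.join_nil, PySem.Chars.join_singleton]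
        simp
      | r :: R =>
        have hlast : pvEndsAl (c :: cs) = pvEndsAl (e :: d') := by
          simp [pvEndsAl, hlasteq]
        have htr : pvTrail (c :: cs) = pvTrail (e :: d') := by
          unfold pvTrail; rw [hlast, if_neg hrunsne]; simp [hr]
        rw [PySem.Chars.join_cons_cons, htr]
        simp
  | case3 c cs hal ih =>
    have lhs1 : pvTailF false (c :: cs) = pvTailF false cs := by simp [pvTailF, hal]
    have hrc : pvRuns (c :: cs) = pvRuns cs := by rw [pvRuns, if_neg hal]
    rw [lhs1, ih, hrc]
    match hr : pvRuns cs with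
    | [] =>
      simp [pvTrail, hr]
      intro h
      exact absurd (hrc.trans hr) h
    | r :: R =>
      have hcsne : cs ≠ [] := by intro h; rw [h] at hr; simp [pvRuns] at hr
      have : pvEndsAl (c :: cs) = pvEndsAl cs := by
        simp [pvEndsAl, pvGetLast?_cons c cs hcsne]
      simp [pvTrail, hr, hrc, this]

theorem pvStrip (cs : List Char) :
    PySem.Chars.stripChars (PySem.Chars.join ['_'] (pvRuns cs) ++ pvTrail cs) ['_']
      = PySem.Chars.join ['_'] (pvRuns cs) := by
  by_cases h : pvRuns cs = []
  · simp [pvTrail, h, PySem.Chars.join_nil, PySem.Chars.stripChars]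
  · have good := pvRuns_good cs
    obtain ⟨c0, t0, hJ, hc0⟩ := pvJoin_head _ h good
    obtain ⟨cl, hcl, hclal⟩ := pvJoin_last _ good h
    have hstep1 : (PySem.Chars.join ['_'] (pvRuns cs) ++ pvTrail cs).dropWhile
        (fun c => (['_'] : List Char).contains c) = PySem.Chars.join ['_'] (pvRuns cs) ++ pvTrail cs := by
      rw [hJ]
      simp [List.dropWhile_cons]
      intro e
      exact absurd e (pvAl_ne_underscore c0 hc0)
    have hstep4 : (PySem.Chars.join ['_'] (pvRuns cs)).reverse.dropWhile
        (fun c => (['_'] : List Char).contains c) = (PySem.Chars.join ['_'] (pvRuns cs)).reverse := by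
      have hhead : (PySem.Chars.join ['_'] (pvRuns cs)).reverse.head? = some cl := by
        rw [List.head?_reverse, hcl]
      match hrev : (PySem.Chars.join ['_'] (pvRuns cs)).reverse with
      | [] => simp
      | a :: l =>
        rw [hrev] at hhead
        have : a = cl := by simpa using hhead
        subst this
        simp [List.dropWhile_cons]
        intro e
        exact absurd e (pvAl_ne_underscore a hclal)
    show (List.dropWhile (fun c => (['_'] : List Char).contains c)
        (List.dropWhile (fun c => (['_'] : List Char).contains c)
          (PySem.Chars.join ['_'] (pvRuns cs) ++ pvTrail cs)).reverse).reverse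
      = PySem.Chars.join ['_'] (pvRuns cs)
    rw [hstep1, List.reverse_append]
    have htrailcases : pvTrail cs = [] ∨ pvTrail cs = ['_'] := by
      unfold pvTrail
      split_ifs <;> simp
    rcases htrailcases with ht | ht
    · rw [ht]
      simp only [List.reverse_nil, List.nil_append]
      rw [hstep4, List.reverse_reverse]
    · rw [ht]
      simp only [List.reverse_cons, List.reverse_nil, List.nil_append, List.singleton_append]
      rw [List.dropWhile_cons, if_pos (by decide), hstep4, List.reverse_reverse]

theorem pvCore (cs : List Char) :
    PySem.Chars.stripChars (cs.foldl pvStepA []) ['_'] = PySem.Chars.join ['_'] (pvRuns cs) := by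
  rw [pvFold_eq cs [] false (by simp)]
  rw [List.nil_append, pvM, pvStrip]

-- ===== VERDICT (by name: the statement is the Claim_ definition above) =====
theorem metric_id_py_spec : Claim_equal_metric_id_py := by
  intro label _
  show metric_id_py label = metric_id_py_alt label
  unfold metric_id_py metric_id_py_alt
  simp only [pvCore]
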